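-- pv_equiv track=rewrite | github.com/seethesaenz/ProjectEuler | SeeTheSaenz/euler41-50/euler45.py | tri_pent_hex
-- ===== SOURCE A (Python) =====
-- def tri_pent_hex(limit):
--     triangle = [i * (i + 1) // 2 for i in range(1, limit)]
--     pentagonal = [i * (3 * i - 1) // 2 for i in range(1, limit)]
--     hexagonal = [i * (2 * i - 1) for i in range(1, limit)]
--     biglist = triangle + pentagonal + hexagonal
--     triangle.clear()
--     pentagonal.clear()
--     hexagonal.clear()
--     hashtbl = [0] * (max(biglist)+1)
--     for i in range(0, len(biglist)):
--         hashtbl[biglist[i]] += 1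
--     solutions = set()
--     for i in range(0, len(biglist)):
--         if (hashtbl[biglist[i]] > 2):
--             solutions.add(biglist[i])
--     return solutions
-- ===== SOURCE B (Python) =====
-- def tri_pent_hex(limit):
--     pent = {i * (3 * i - 1) // 2 for i in range(1, limit)}
--     hexa = {i * (2 * i - 1) for i in range(1, limit)}
--     return {t for t in (i * (i + 1) // 2 for i in range(1, limit))
--             if t in pent and t in hexa}
-- ===== Notes on version B (the rewrite author's own statement) =====
-- stated objective: faster
-- what changed: B intersects the three figurate-number sets built directly as hash sets, instead of concatenating the three lists and counting occurrences in a dense table of size max(biglist)+1 ~ 2*limit^2.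
import Mathlib
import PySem

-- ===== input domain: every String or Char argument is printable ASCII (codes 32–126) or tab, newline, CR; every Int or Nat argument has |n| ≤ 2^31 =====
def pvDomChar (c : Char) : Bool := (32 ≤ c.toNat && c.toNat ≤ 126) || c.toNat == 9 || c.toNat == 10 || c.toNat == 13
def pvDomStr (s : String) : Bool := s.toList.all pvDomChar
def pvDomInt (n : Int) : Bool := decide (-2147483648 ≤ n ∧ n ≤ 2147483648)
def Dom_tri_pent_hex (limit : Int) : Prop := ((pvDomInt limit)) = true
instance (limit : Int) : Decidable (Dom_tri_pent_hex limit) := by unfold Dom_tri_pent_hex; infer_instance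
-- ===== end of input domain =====

-- B replaces A's dense counting table (size max ~ 2*limit^2) by membership tests in the two
-- smaller figurate sets: asymptotically faster (O(limit) vs O(limit^2)).

-- ===== PORT A =====
-- hand-ported exact helpers for Python's t[i] / t[i] = v on the counting table, kept as an Array
-- for O(1) indexed access (the Python list [0]*(max+1) is only read/written by index):
-- negative index counts from the end; where Python raises IndexError, get returns d / set is the identity
def pvTableGet (t : Array Int) (i : Int) (d : Int) : Int :=
  if i < 0 then
    (if 0 ≤ (t.size : Int) + i then t.getD ((t.size : Int) + i).toNat d else d)
  else
    (if i < (t.size : Int) then t.getD i.toNat d else d)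

def pvTableSet (t : Array Int) (i : Int) (v : Int) : Array Int :=
  if i < 0 then
    (if 0 ≤ (t.size : Int) + i then t.setIfInBounds ((t.size : Int) + i).toNat v else t)
  else
    (if i < (t.size : Int) then t.setIfInBounds i.toNat v else t)

def tri_pent_hex (limit : Int) : List Int :=
  let triangle := (PySem.List.pyRange 1 limit 1).map (fun i => PySem.Int.floordiv (i * (i + 1)) 2)
  let pentagonal := (PySem.List.pyRange 1 limit 1).map (fun i => PySem.Int.floordiv (i * (3 * i - 1)) 2)
  let hexagonal := (PySem.List.pyRange 1 limit 1).map (fun i => i * (2 * i - 1))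
  let biglist := triangle ++ pentagonal ++ hexagonal
  -- triangle.clear() / pentagonal.clear() / hexagonal.clear(): the cleared lists are never read again
  let hashtbl0 : Array Int := Array.replicate (((PySem.List.max? biglist (fun x => x)).getD 0) + 1).toNat 0
  -- max([]) raises ValueError: limit < 2 is excluded by Pre_; the .getD default is never used there
  let hashtbl := (PySem.List.pyRange 0 (PySem.List.len biglist) 1).foldl
      (fun t j => pvTableSet t (PySem.List.pyGetD biglist j 0)
                    (pvTableGet t (PySem.List.pyGetD biglist j 0) 0 + 1)) hashtbl0
  (PySem.List.pyRange 0 (PySem.List.len biglist) 1).foldl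
      (fun s j => if 2 < pvTableGet hashtbl (PySem.List.pyGetD biglist j 0) 0
                  then PySem.Set.add s (PySem.List.pyGetD biglist j 0) else s)
      PySem.Set.empty

-- ===== PORT B =====
def tri_pent_hex_alt (limit : Int) : List Int :=
  let pent := PySem.Set.ofList ((PySem.List.pyRange 1 limit 1).map (fun i => PySem.Int.floordiv (i * (3 * i - 1)) 2))
  let hexa := PySem.Set.ofList ((PySem.List.pyRange 1 limit 1).map (fun i => i * (2 * i - 1)))
  (PySem.List.pyRange 1 limit 1).foldl
    (fun s i =>
      let t := PySem.Int.floordiv (i * (i + 1)) 2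
      if PySem.Set.contains pent t && PySem.Set.contains hexa t then PySem.Set.add s t else s)
    PySem.Set.empty

-- ===== PRECONDITION & SPEC =====
-- Pre_ excludes limit < 2, where the three lists are empty and A's max([]) raises ValueError.
def Pre_tri_pent_hex (limit : Int) : Prop := 2 ≤ limit
instance (limit : Int) : Decidable (Pre_tri_pent_hex limit) := by unfold Pre_tri_pent_hex; infer_instance
def pvWitness_tri_pent_hex : Int := (10)

def Spec_tri_pent_hex (limit : Int) (out : List Int) : Prop := out = tri_pent_hex_alt limit
instance (limit : Int) (out : List Int) : Decidable (Spec_tri_pent_hex limit out) := by unfold Spec_tri_pent_hex; infer_instance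

-- ===== CLAIM (what is proved, stated in full; the proofs are below) =====
def Claim_equal_tri_pent_hex : Prop := ∀ (limit : Int), Dom_tri_pent_hex limit → Pre_tri_pent_hex limit → Spec_tri_pent_hex limit (tri_pent_hex limit)

-- ===== LEMMAS AND PROOFS =====

-- abbreviations for the three generator lists (proof-side only)
def pvT (i : Int) : Int := PySem.Int.floordiv (i * (i + 1)) 2
def pvP (i : Int) : Int := PySem.Int.floordiv (i * (3 * i - 1)) 2
def pvH (i : Int) : Int := i * (2 * i - 1)
def pvR (limit : Int) : List Int := PySem.List.pyRange 1 limit 1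
def pvTri (limit : Int) : List Int := (pvR limit).map pvT
def pvPen (limit : Int) : List Int := (pvR limit).map pvP
def pvHex (limit : Int) : List Int := (pvR limit).map pvH
def pvBig (limit : Int) : List Int := pvTri limit ++ pvPen limit ++ pvHex limit
def pvUpd (t : List Int) (u : Int) : List Int :=
  PySem.List.pySetD t u (PySem.List.pyGetD t u 0 + 1)
def pvUpdA (t : Array Int) (u : Int) : Array Int :=
  pvTableSet t u (pvTableGet t u 0 + 1)

lemma pv_fd2 (n k : Int) (h : n = 2 * k) : PySem.Int.floordiv n 2 = k := by
  rw [PySem.Int.floordiv_eq_ediv_of_pos (by norm_num), h, Int.mul_ediv_cancel_left _ (by norm_num)]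

lemma pv_twoT (i : Int) : 2 * pvT i = i * (i + 1) := by
  obtain ⟨k, hk⟩ := Int.even_mul_succ_self i
  have h2 : i * (i + 1) = 2 * k := by omega
  rw [pvT, pv_fd2 _ _ h2, h2]

lemma pv_twoP (i : Int) : 2 * pvP i = i * (3 * i - 1) := by
  rcases Int.even_or_odd i with ⟨k, hk⟩ | ⟨k, hk⟩
  · have h2 : i * (3 * i - 1) = 2 * (k * (6 * k - 1)) := by subst hk; ring
    rw [pvP, pv_fd2 _ _ h2, h2]
  · have h2 : i * (3 * i - 1) = 2 * ((2 * k + 1) * (3 * k + 1)) := by subst hk; ring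
    rw [pvP, pv_fd2 _ _ h2, h2]

lemma pv_T_inj {a b : Int} (ha : 1 ≤ a) (hb : 1 ≤ b) (h : pvT a = pvT b) : a = b := by
  have h' : a * (a + 1) = b * (b + 1) := by rw [← pv_twoT, ← pv_twoT, h]
  have h0 : (a - b) * (a + b + 1) = 0 := by linear_combination h'
  rcases mul_eq_zero.mp h0 with h1 | h1 <;> omega

lemma pv_P_inj {a b : Int} (ha : 1 ≤ a) (hb : 1 ≤ b) (h : pvP a = pvP b) : a = b := by
  have h' : a * (3 * a - 1) = b * (3 * b - 1) := by rw [← pv_twoP, ← pv_twoP, h]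
  have h0 : (a - b) * (3 * (a + b) - 1) = 0 := by linear_combination h'
  rcases mul_eq_zero.mp h0 with h1 | h1 <;> omega

lemma pv_H_inj {a b : Int} (ha : 1 ≤ a) (hb : 1 ≤ b) (h : pvH a = pvH b) : a = b := by
  have h0 : (a - b) * (2 * (a + b) - 1) = 0 := by
    have h' := h; unfold pvH at h'; linear_combination h'
  rcases mul_eq_zero.mp h0 with h1 | h1 <;> omega

lemma pv_T_pos {i : Int} (hi : 1 ≤ i) : 1 ≤ pvT i := by
  have := pv_twoT i; nlinarith
lemma pv_P_pos {i : Int} (hi : 1 ≤ i) : 1 ≤ pvP i := by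
  have := pv_twoP i; nlinarith
lemma pv_H_pos {i : Int} (hi : 1 ≤ i) : 1 ≤ pvH i := by
  unfold pvH; nlinarith

lemma pv_big_pos {limit : Int} {u : Int} (hu : u ∈ pvBig limit) : 1 ≤ u := by
  simp only [pvBig, pvTri, pvPen, pvHex, List.mem_append, List.mem_map] at hu
  rcases hu with (⟨i, hi, rfl⟩ | ⟨i, hi, rfl⟩) | ⟨i, hi, rfl⟩ <;>
    [exact pv_T_pos (PySem.List.mem_pyRange_one.mp hi).1;
     exact pv_P_pos (PySem.List.mem_pyRange_one.mp hi).1;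
     exact pv_H_pos (PySem.List.mem_pyRange_one.mp hi).1]

lemma pv_nodup_tri (limit : Int) : (pvTri limit).Nodup := by
  refine List.Nodup.map_on ?_ (PySem.List.nodup_pyRange_one 1 limit)
  intro x hx y hy h
  exact pv_T_inj (PySem.List.mem_pyRange_one.mp hx).1 (PySem.List.mem_pyRange_one.mp hy).1 h
lemma pv_nodup_pen (limit : Int) : (pvPen limit).Nodup := by
  refine List.Nodup.map_on ?_ (PySem.List.nodup_pyRange_one 1 limit)
  intro x hx y hy h
  exact pv_P_inj (PySem.List.mem_pyRange_one.mp hx).1 (PySem.List.mem_pyRange_one.mp hy).1 h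
lemma pv_nodup_hex (limit : Int) : (pvHex limit).Nodup := by
  refine List.Nodup.map_on ?_ (PySem.List.nodup_pyRange_one 1 limit)
  intro x hx y hy h
  exact pv_H_inj (PySem.List.mem_pyRange_one.mp hx).1 (PySem.List.mem_pyRange_one.mp hy).1 h

-- the counting table: getD at a nonnegative index
lemma pv_pyGetD_nonneg (xs : List Int) {v : Int} (hv : 0 ≤ v) (d : Int) :
    PySem.List.pyGetD xs v d = xs.getD v.toNat d := by
  have := PySem.List.pyGetD_natCast xs v.toNat d
  rwa [Int.toNat_of_nonneg hv] at this

lemma pv_tbl_spec (vs : List Int) : ∀ (t : List Int),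
    (∀ u ∈ vs, 0 ≤ u ∧ u < (t.length : Int)) →
    (vs.foldl pvUpd t).length = t.length ∧
    ∀ v : Int, 0 ≤ v →
      PySem.List.pyGetD (vs.foldl pvUpd t) v 0 = PySem.List.pyGetD t v 0 + List.count v vs := by
  induction vs with
  | nil => intro t _; simp
  | cons u vs ih =>
    intro t h
    obtain ⟨hu0, hul⟩ := h u (by simp)
    have hset : pvUpd t u = t.set u.toNat (PySem.List.pyGetD t u 0 + 1) := by
      rw [pvUpd, PySem.List.pySetD_of_nonneg _ _ hu0]
    have hlen : (pvUpd t u).length = t.length := by rw [hset, List.length_set]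
    obtain ⟨ihl, ihg⟩ := ih (pvUpd t u) (by
      intro w hw; have := h w (by simp [hw]); omega)
    refine ⟨by simp only [List.foldl_cons]; rw [ihl, hlen], ?_⟩
    intro v hv
    simp only [List.foldl_cons]
    rw [ihg v hv, List.count_cons]
    have key : PySem.List.pyGetD (pvUpd t u) v 0
        = PySem.List.pyGetD t v 0 + (if v == u then 1 else 0) := by
      by_cases hvu : v = u
      · subst hvu
        rw [pv_pyGetD_nonneg _ hv, pv_pyGetD_nonneg _ hv, hset]
        have hlt : v.toNat < t.length := by omega
        rw [List.getD_eq_getElem?_getD, List.getElem?_set_self (by simpa using hlt)]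
        simp [List.getD_eq_getElem?_getD, List.getElem?_eq_getElem hlt,
          pv_pyGetD_nonneg t hv]
      · rw [pv_pyGetD_nonneg _ hv, pv_pyGetD_nonneg _ hv, hset]
        have hne : u.toNat ≠ v.toNat := by omega
        rw [List.getD_eq_getElem?_getD, List.getElem?_set_ne hne, ← List.getD_eq_getElem?_getD]
        simp [hvu]
    rw [key]
    rcases eq_or_ne v u with rfl | hvu
    · simp; push_cast; ring
    · simp [hvu, Ne.symm hvu]

-- count in biglist characterises triple membership
lemma pv_count_iff (limit v : Int) :
    2 < List.count v (pvBig limit) ↔ v ∈ pvTri limit ∧ v ∈ pvPen limit ∧ v ∈ pvHex limit := by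
  have c1 := (List.nodup_iff_count_le_one).mp (pv_nodup_tri limit) v
  have c2 := (List.nodup_iff_count_le_one).mp (pv_nodup_pen limit) v
  have c3 := (List.nodup_iff_count_le_one).mp (pv_nodup_hex limit) v
  have e : List.count v (pvBig limit)
      = List.count v (pvTri limit) + List.count v (pvPen limit) + List.count v (pvHex limit) := by
    simp [pvBig, List.count_append]; omega
  rw [e, ← List.count_pos_iff, ← List.count_pos_iff, ← List.count_pos_iff]
  omega

lemma pv_update_absorb (s : PySem.Set Int) (ys : List Int) (h : ∀ y ∈ ys, y ∈ s) :
    PySem.Set.update s ys = s := by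
  rw [PySem.Set.update_eq_append_filter]
  have : List.filter (fun y => !PySem.Set.contains s y) (PySem.Set.ofList ys) = [] := by
    rw [List.filter_eq_nil_iff]
    intro y hy
    have hmem : y ∈ s := h y ((PySem.Set.mem_ofList _ _).mp hy)
    simp [hmem]
  rw [this, List.append_nil]


-- bridge: the Array-table helpers agree with the list-level primitives at nonnegative indices
lemma pv_tget (t : Array Int) {i : Int} (hi : 0 ≤ i) (d : Int) :
    pvTableGet t i d = PySem.List.pyGetD t.toList i d := by
  rw [pv_pyGetD_nonneg _ hi]
  simp only [pvTableGet]
  rw [if_neg (by omega)]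
  by_cases hlt : i < (t.size : Int)
  · rw [if_pos hlt, Array.getD_eq_getD_getElem?, ← Array.getElem?_toList, ← List.getD_eq_getElem?_getD]
  · rw [if_neg hlt]
    exact (List.getD_eq_default _ _ (by simp only [Array.length_toList]; omega)).symm

lemma pv_tset (t : Array Int) {i : Int} (hi : 0 ≤ i) (v : Int) :
    (pvTableSet t i v).toList = PySem.List.pySetD t.toList i v := by
  rw [PySem.List.pySetD_of_nonneg _ _ hi]
  simp only [pvTableSet]
  rw [if_neg (by omega)]
  by_cases hlt : i < (t.size : Int)
  · rw [if_pos hlt, Array.toList_setIfInBounds]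
  · rw [if_neg hlt]
    exact (List.set_eq_of_length_le (by simp only [Array.length_toList]; omega)).symm

lemma pv_updA_toList (t : Array Int) {u : Int} (hu : 0 ≤ u) :
    (pvUpdA t u).toList = pvUpd t.toList u := by
  rw [pvUpdA, pv_tset t hu, pvUpd, pv_tget t hu]

lemma pv_fold_toList (vs : List Int) : ∀ t : Array Int, (∀ u ∈ vs, 0 ≤ u) →
    (vs.foldl pvUpdA t).toList = vs.foldl pvUpd t.toList := by
  induction vs with
  | nil => intro t _; rfl
  | cons u vs ih =>
    intro t h
    simp only [List.foldl_cons]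
    rw [ih (pvUpdA t u) (fun w hw => h w (by simp [hw])), pv_updA_toList t (h u (by simp))]

-- fold-shape of A's two index loops, stated over the abstract list and table
lemma pv_A_shape (xs : List Int) (t0 : Array Int) :
    (PySem.List.pyRange 0 (PySem.List.len xs) 1).foldl
      (fun s j => if 2 < pvTableGet
            ((PySem.List.pyRange 0 (PySem.List.len xs) 1).foldl
              (fun t j => pvTableSet t (PySem.List.pyGetD xs j 0)
                (pvTableGet t (PySem.List.pyGetD xs j 0) 0 + 1)) t0)
            (PySem.List.pyGetD xs j 0) 0
        then PySem.Set.add s (PySem.List.pyGetD xs j 0) else s)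
      PySem.Set.empty
  = PySem.Set.ofList (xs.filter (fun v => decide (2 < pvTableGet (xs.foldl pvUpdA t0) v 0))) := by
  have h1 : (fun (t : Array Int) (j : Int) => pvTableSet t (PySem.List.pyGetD xs j 0)
      (pvTableGet t (PySem.List.pyGetD xs j 0) 0 + 1))
      = fun t j => pvUpdA t (PySem.List.pyGetD xs j 0) := rfl
  rw [h1]
  simp only [PySem.List.len_eq]
  have hin : List.foldl (fun t j => pvUpdA t (PySem.List.pyGetD xs j 0)) t0
      (PySem.List.pyRange 0 (xs.length : Int)) = List.foldl pvUpdA t0 xs :=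
    PySem.List.foldl_pyRange_zero_pyGetD' xs 0 pvUpdA t0
  simp only [hin]
  have h2 : (fun (s : PySem.Set Int) (j : Int) =>
        if 2 < pvTableGet (xs.foldl pvUpdA t0) (PySem.List.pyGetD xs j 0) 0
        then PySem.Set.add s (PySem.List.pyGetD xs j 0) else s)
      = fun s j => (fun (s : PySem.Set Int) (v : Int) =>
            if 2 < pvTableGet (xs.foldl pvUpdA t0) v 0
            then PySem.Set.add s v else s) s (PySem.List.pyGetD xs j 0) := rfl
  have hout := PySem.List.foldl_pyRange_zero_pyGetD' xs 0
      (fun (s : PySem.Set Int) (v : Int) =>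
        if 2 < pvTableGet (xs.foldl pvUpdA t0) v 0
        then PySem.Set.add s v else s) PySem.Set.empty
  rw [h2, hout,
      PySem.List.foldl_ite_eq_foldl_filter
        (fun v => 2 < pvTableGet (xs.foldl pvUpdA t0) v 0) PySem.Set.add xs PySem.Set.empty]
  exact (PySem.Set.ofList_eq_foldl _).symm

lemma pv_A_final (limit : Int) (hl : 2 ≤ limit) :
    tri_pent_hex limit
      = PySem.Set.ofList ((pvTri limit).filter (fun v => decide (2 < List.count v (pvBig limit)))) := by
  have h1R : (1 : Int) ∈ pvR limit := PySem.List.mem_pyRange_one.mpr (by omega)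
  have hmem1 : (1 : Int) ∈ pvBig limit := by
    simp only [pvBig, List.mem_append]
    exact Or.inl (Or.inl (List.mem_map.mpr ⟨1, h1R, by decide⟩))
  cases hmx : PySem.List.max? (pvBig limit) (fun x => x) with
  | none =>
    rw [(PySem.List.max?_eq_none_iff _ _).mp hmx] at hmem1
    exact absurd hmem1 (List.not_mem_nil)
  | some m =>
  have hmax : ∀ y ∈ pvBig limit, y ≤ m := PySem.List.max?_isMax hmx
  have hm1 : 1 ≤ m := hmax 1 hmem1
  set t0 : Array Int := Array.replicate (((PySem.List.max? (pvBig limit) (fun x => x)).getD 0) + 1).toNat 0 with ht0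
  have ht0' : t0.toList = List.replicate (m + 1).toNat 0 := by
    rw [ht0, hmx, Array.toList_replicate]; rfl
  have hpos : ∀ u ∈ pvBig limit, 0 ≤ u := fun u hu => le_trans (by omega) (pv_big_pos hu)
  have hb : ∀ u ∈ pvBig limit, 0 ≤ u ∧ u < (t0.toList.length : Int) := by
    intro u hu
    have := pv_big_pos hu
    have := hmax u hu
    rw [ht0', List.length_replicate]
    omega
  have hcnt : ∀ v ∈ pvBig limit,
      pvTableGet ((pvBig limit).foldl pvUpdA t0) v 0 = (List.count v (pvBig limit) : Int) := by
    intro v hv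
    have hv0 : 0 ≤ v := hpos v hv
    rw [pv_tget _ hv0, pv_fold_toList (pvBig limit) t0 hpos,
        (pv_tbl_spec (pvBig limit) t0.toList hb).2 v hv0, pv_pyGetD_nonneg _ hv0, ht0']
    by_cases hlt : v.toNat < (m + 1).toNat
    · rw [List.getD_replicate _ hlt]; ring
    · rw [List.getD_eq_default _ _ (by simpa using le_of_not_gt hlt)]; ring
  have h1 : tri_pent_hex limit
      = PySem.Set.ofList ((pvBig limit).filter
          (fun v => decide (2 < pvTableGet ((pvBig limit).foldl pvUpdA t0) v 0))) :=
    pv_A_shape (pvBig limit) t0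
  have hcongr : (pvBig limit).filter
        (fun v => decide (2 < pvTableGet ((pvBig limit).foldl pvUpdA t0) v 0))
      = (pvBig limit).filter (fun v => decide (2 < List.count v (pvBig limit))) := by
    apply List.filter_congr
    intro v hv
    simp only [decide_eq_decide]
    rw [hcnt v hv]
    omega
  rw [h1, hcongr]
  have hsplit : (pvBig limit).filter (fun v => decide (2 < List.count v (pvBig limit)))
      = (pvTri limit).filter (fun v => decide (2 < List.count v (pvBig limit)))
        ++ ((pvPen limit).filter (fun v => decide (2 < List.count v (pvBig limit)))
            ++ (pvHex limit).filter (fun v => decide (2 < List.count v (pvBig limit)))) := by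
    show (pvTri limit ++ pvPen limit ++ pvHex limit).filter _ = _
    rw [List.filter_append, List.filter_append, List.append_assoc]
  rw [hsplit, PySem.Set.ofList_append]
  apply pv_update_absorb
  intro y hy
  rw [List.mem_append] at hy
  have hy' : (y ∈ pvPen limit ∨ y ∈ pvHex limit) ∧ decide (2 < List.count y (pvBig limit)) = true := by
    rcases hy with hy | hy <;> rcases List.mem_filter.mp hy with ⟨h', hp⟩ <;> exact ⟨by tauto, hp⟩
  obtain ⟨-, hp⟩ := hy'
  have htriple := (pv_count_iff limit y).mp (by simpa using hp)
  exact (PySem.Set.mem_ofList _ _).mpr (List.mem_filter.mpr ⟨htriple.1, hp⟩)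

lemma pv_B_fold (limit : Int) (G : PySem.Set Int → Int → PySem.Set Int) :
    (pvR limit).foldl (fun s i => G s (pvT i)) PySem.Set.empty = (pvTri limit).foldl G PySem.Set.empty :=
  (List.foldl_map).symm

lemma pv_B_eq (limit : Int) :
    tri_pent_hex_alt limit
      = PySem.Set.ofList ((pvTri limit).filter
          (fun t => PySem.Set.contains (PySem.Set.ofList (pvPen limit)) t
                    && PySem.Set.contains (PySem.Set.ofList (pvHex limit)) t)) := by
  refine Eq.trans (pv_B_fold limit (fun s t =>
      if PySem.Set.contains (PySem.Set.ofList (pvPen limit)) t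
         && PySem.Set.contains (PySem.Set.ofList (pvHex limit)) t
      then PySem.Set.add s t else s)) ?_
  rw [PySem.List.foldl_if_eq_foldl_filter
        (fun t => PySem.Set.contains (PySem.Set.ofList (pvPen limit)) t
                  && PySem.Set.contains (PySem.Set.ofList (pvHex limit)) t)
        PySem.Set.add (pvTri limit) PySem.Set.empty]
  exact (PySem.Set.ofList_eq_foldl _).symm

lemma pv_main (limit : Int) (hl : 2 ≤ limit) : tri_pent_hex limit = tri_pent_hex_alt limit := by
  rw [pv_A_final limit hl, pv_B_eq limit]
  congr 1
  apply List.filter_congr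
  intro v hv
  rw [Bool.eq_iff_iff]
  simp only [decide_eq_true_eq, Bool.and_eq_true, PySem.Set.contains_iff, PySem.Set.mem_ofList]
  rw [pv_count_iff]
  constructor
  · rintro ⟨-, hp, hh⟩; exact ⟨hp, hh⟩
  · rintro ⟨hp, hh⟩; exact ⟨hv, hp, hh⟩

-- ===== VERDICT (by name: the statement is the Claim_ definition above) =====
theorem tri_pent_hex_spec : Claim_equal_tri_pent_hex := by
  intro limit _ hpre
  unfold Spec_tri_pent_hex
  exact pv_main limit hpre
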